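-- pv_equiv track=rewrite | github.com/jebt/kattis | problems/archive/bela.py | solve
-- ===== SOURCE A (Python) =====
-- def solve(problem_input: str):
--     value = {"A": 11, "K": 4, "Q": 3, "J": 2, "T": 10, "9": 0, "8": 0, "7": 0}
--     cards = problem_input.splitlines()[1::]
--     dominant = problem_input.split()[1]
--     points = 0
--     for card in cards:
--         suit = card[1]
--         number = card[0]
--         if suit == dominant:
--             if number == "J":
--                 points += 20
--             elif number == "9":
--                 points += 14
--             else:
--                 points += value[number]
--         else:
--             points += value[number]
--     return points
-- ===== SOURCE B (Python) =====
-- BASE = {"A": 11, "K": 4, "Q": 3, "J": 2, "T": 10, "9": 0, "8": 0, "7": 0}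
--
--
-- def solve(problem_input: str):
--     cards = problem_input.splitlines()[1:]
--     dominant = problem_input.split()[1]
--     base = sum(BASE[card[0]] for card in cards)
--     jacks = 18 * sum(1 for card in cards if card[1] == dominant and card[0] == "J")
--     nines = 14 * sum(1 for card in cards if card[1] == dominant and card[0] == "9")
--     return base + jacks + nines
-- ===== Notes on version B (the rewrite author's own statement) =====
-- stated objective: alternative
-- what changed: Replaces the single branching accumulation loop by a base sum of card values plus counted corrections (+18 per dominant-suit jack, +14 per dominant-suit nine).
import Mathlib
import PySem

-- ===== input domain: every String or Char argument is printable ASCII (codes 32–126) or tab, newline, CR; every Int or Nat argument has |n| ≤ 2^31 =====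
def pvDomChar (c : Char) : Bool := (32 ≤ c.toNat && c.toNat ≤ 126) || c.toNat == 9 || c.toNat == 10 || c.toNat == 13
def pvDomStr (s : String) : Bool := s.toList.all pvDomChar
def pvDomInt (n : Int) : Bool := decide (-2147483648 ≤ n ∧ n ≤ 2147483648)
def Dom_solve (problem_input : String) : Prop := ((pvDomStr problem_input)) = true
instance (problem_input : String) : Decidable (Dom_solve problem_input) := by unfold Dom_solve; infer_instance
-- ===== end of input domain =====

-- B sums the base table over all cards and adds counted corrections instead of branching per card; objective: alternative decomposition, same cost.
-- Pre_solve excludes exactly the inputs where Python A raises (fewer than two whitespace tokens, a card line shorter than 2 characters, or a card rank outside the table).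

-- ===== PORT A =====
-- the Python dict 'value', keyed by the one-character rank
def cardValue : PySem.Dict Char Int :=
  PySem.Dict.ofList [('A', 11), ('K', 4), ('Q', 3), ('J', 2), ('T', 10), ('9', 0), ('8', 0), ('7', 0)]

def solve (problem_input : String) : Int :=
  let cards := (PySem.Str.splitlines problem_input).drop 1
  let dominant := (PySem.List.pyGet? (PySem.Str.split₀ problem_input) 1).getD ""
  cards.foldl (fun points card =>
    let suit := (PySem.Str.pyGet? card 1).getD ' '
    let number := (PySem.Str.pyGet? card 0).getD ' '
    if dominant.toList == [suit] then
      if number == 'J' then points + 20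
      else if number == '9' then points + 14
      else points + (cardValue.get? number).getD 0
    else points + (cardValue.get? number).getD 0) 0

-- ===== PORT B =====
def solve_alt (problem_input : String) : Int :=
  let cards := (PySem.Str.splitlines problem_input).drop 1
  let dominant := (PySem.List.pyGet? (PySem.Str.split₀ problem_input) 1).getD ""
  let base := (cards.map (fun c => (cardValue.get? ((PySem.Str.pyGet? c 0).getD ' ')).getD 0)).sum
  let jacks : Int := 18 * (cards.countP (fun c =>
    dominant.toList == [(PySem.Str.pyGet? c 1).getD ' '] && (PySem.Str.pyGet? c 0).getD ' ' == 'J') : Nat)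
  let nines : Int := 14 * (cards.countP (fun c =>
    dominant.toList == [(PySem.Str.pyGet? c 1).getD ' '] && (PySem.Str.pyGet? c 0).getD ' ' == '9') : Nat)
  base + jacks + nines

-- ===== PRECONDITION & SPEC =====
def Pre_solve (problem_input : String) : Prop :=
  2 ≤ (PySem.Str.split₀ problem_input).length ∧
  ∀ c ∈ (PySem.Str.splitlines problem_input).drop 1,
    2 ≤ c.toList.length ∧ c.toList.head?.getD ' ' ∈ ['A', 'K', 'Q', 'J', 'T', '9', '8', '7']
instance (problem_input : String) : Decidable (Pre_solve problem_input) := by unfold Pre_solve; infer_instance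

def pvWitness_solve : String := "X S\nJS\n9H"

def Spec_solve (problem_input : String) (out : Int) : Prop := out = solve_alt problem_input
instance (problem_input : String) (out : Int) : Decidable (Spec_solve problem_input out) := by unfold Spec_solve; infer_instance

-- ===== CLAIM (what is proved, stated in full; the proofs are below) =====
def Claim_equal_solve : Prop := ∀ (problem_input : String), Dom_solve problem_input → Pre_solve problem_input → Spec_solve problem_input (solve problem_input)

-- ===== LEMMAS AND PROOFS =====

-- A's branching loop equals B's base-plus-corrections sum, for any card list and dominant token (accumulator generalised).
theorem solve_loop_eq (dominant : String) (cards : List String) (acc : Int) :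
    cards.foldl (fun points card =>
      let suit := (PySem.Str.pyGet? card 1).getD ' '
      let number := (PySem.Str.pyGet? card 0).getD ' '
      if dominant.toList == [suit] then
        if number == 'J' then points + 20
        else if number == '9' then points + 14
        else points + (cardValue.get? number).getD 0
      else points + (cardValue.get? number).getD 0) acc
    = acc + (cards.map (fun c => (cardValue.get? ((PySem.Str.pyGet? c 0).getD ' ')).getD 0)).sum
        + 18 * (cards.countP (fun c =>
            dominant.toList == [(PySem.Str.pyGet? c 1).getD ' '] && (PySem.Str.pyGet? c 0).getD ' ' == 'J') : Nat)
        + 14 * (cards.countP (fun c =>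
            dominant.toList == [(PySem.Str.pyGet? c 1).getD ' '] && (PySem.Str.pyGet? c 0).getD ' ' == '9') : Nat) := by
  induction cards generalizing acc with
  | nil => simp
  | cons c cs ih =>
    rw [List.foldl_cons, ih]
    simp only [List.map_cons, List.sum_cons, List.countP_cons, pysem, PySem.List.pyGet?_ofNat', beq_iff_eq,
      Bool.and_eq_true]
    by_cases hs : dominant.toList = [c.toList[1]?.getD ' ']
    · by_cases hJ : c.toList[0]?.getD ' ' = 'J'
      · have h2 : ((cardValue.get? 'J').getD 0 : Int) = 2 := by decide
        simp [hs, hJ, h2]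
        omega
      · by_cases h9 : c.toList[0]?.getD ' ' = '9'
        · have h0 : ((cardValue.get? '9').getD 0 : Int) = 0 := by decide
          simp [hs, h9, h0]
          omega
        · simp [hs, hJ, h9]
          omega
    · simp [hs]
      omega

-- ===== VERDICT (by name: the statement is the Claim_ definition above) =====
theorem solve_spec : Claim_equal_solve := by
  intro problem_input _ _
  unfold Spec_solve solve solve_alt
  simp only []
  rw [solve_loop_eq]
  ring
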